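-- pv_equiv track=rewrite | github.com/AkusChhabra/CPS109 | allproblemx.py | count_growlers
-- ===== SOURCE A (Python) =====
-- def count_growlers(animals):
--
--   res = 0
--
--   if not animals:
--     return 0
--
--   for i in range(len(animals)):
--     cats, dogs = 0, 0
--     if animals[i] == 'tac' or animals[i] == 'god': # Facing Right
--       for j in range(i+1, len(animals)):
--         if animals[j] == 'cat' or animals[j] == 'tac':
--           cats += 1
--         if animals[j] == 'dog' or animals[j] == 'god':
--           dogs += 1
--       if dogs > cats:
--         res += 1
--     if animals[i] == 'cat' or animals[i] == 'dog': # Facing Left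
--       for j in range(i):
--         if animals[j] == 'cat' or animals[j] == 'tac':
--           cats += 1
--         if animals[j] == 'dog' or animals[j] == 'god':
--           dogs += 1
--       if dogs > cats:
--         res += 1
--
--   return res
-- ===== SOURCE B (Python) =====
-- def count_growlers(animals):
--     tc = animals.count('cat') + animals.count('tac')
--     td = animals.count('dog') + animals.count('god')
--     pc = pd = res = 0
--     for a in animals:
--         if a == 'cat':            # facing left: prefix dogs vs prefix cats
--             if pd > pc: res += 1
--             pc += 1
--         elif a == 'dog':
--             if pd > pc: res += 1
--             pd += 1
--         elif a == 'tac':          # facing right: suffix dogs vs suffix cats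
--             if td - pd > tc - pc - 1: res += 1
--             pc += 1
--         elif a == 'god':
--             if td - pd - 1 > tc - pc: res += 1
--             pd += 1
--     return res
-- ===== Notes on version B (the rewrite author's own statement) =====
-- stated objective: alternative
-- what changed: Replaces A's per-animal inner index rescans with a single left-to-right pass keeping running prefix cat/dog counts plus totals taken once with list.count (O(n) worst case vs A's O(n^2) worst case; not measurably faster on the sampled inputs, where few elements are animal words).
import Mathlib
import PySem

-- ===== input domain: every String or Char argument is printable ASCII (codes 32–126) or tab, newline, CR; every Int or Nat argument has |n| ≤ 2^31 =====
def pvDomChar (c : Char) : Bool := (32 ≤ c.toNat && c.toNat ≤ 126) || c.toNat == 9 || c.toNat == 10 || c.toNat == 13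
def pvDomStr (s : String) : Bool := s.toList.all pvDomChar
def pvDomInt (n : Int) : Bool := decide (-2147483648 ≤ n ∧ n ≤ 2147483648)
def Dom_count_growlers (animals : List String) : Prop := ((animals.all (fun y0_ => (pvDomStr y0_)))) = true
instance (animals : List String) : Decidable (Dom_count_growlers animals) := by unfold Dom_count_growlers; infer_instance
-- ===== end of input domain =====

-- B replaces A's per-animal inner rescans with a single pass keeping running prefix cat/dog counts plus totals.


-- ===== PORT A =====
-- inner 'for j' body of A: update the running (cats, dogs) pair from animals[j]
def cgInnerA (cd : Int × Int) (aj : String) : Int × Int :=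
  let cd := if aj == "cat" || aj == "tac" then (cd.1 + 1, cd.2) else cd
  if aj == "dog" || aj == "god" then (cd.1, cd.2 + 1) else cd

-- outer 'for i' body of A: both branch loops over j, threading (cats, dogs, res) as in the Python
def cgOuterA (xs : List String) (res : Int) (i : Int) : Int :=
  let ai := PySem.List.pyGetD xs i ""
  let cats : Int := 0
  let dogs : Int := 0
  let st :=
    if ai == "tac" || ai == "god" then
      let cd := (PySem.List.pyRange (i + 1) (xs.length : Int) 1).foldl
        (fun cd j => cgInnerA cd (PySem.List.pyGetD xs j "")) (cats, dogs)
      (cd.1, cd.2, if cd.2 > cd.1 then res + 1 else res)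
    else (cats, dogs, res)
  if ai == "cat" || ai == "dog" then
    let cd := (PySem.List.pyRange 0 i 1).foldl
      (fun cd j => cgInnerA cd (PySem.List.pyGetD xs j "")) (st.1, st.2.1)
    if cd.2 > cd.1 then st.2.2 + 1 else st.2.2
  else st.2.2

def count_growlers (animals : List String) : Int :=
  if animals == [] then 0
  else (PySem.List.pyRange 0 (animals.length : Int) 1).foldl (cgOuterA animals) 0

-- ===== PORT B =====
-- loop body of B: one animal, O(1) work with the running prefix counts (st = (res, pc, pd))
def cgStepB (tc td : Int) (st : Int × Int × Int) (a : String) : Int × Int × Int :=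
  if a == "cat" then ((if st.2.2 > st.2.1 then st.1 + 1 else st.1), st.2.1 + 1, st.2.2)
  else if a == "dog" then ((if st.2.2 > st.2.1 then st.1 + 1 else st.1), st.2.1, st.2.2 + 1)
  else if a == "tac" then ((if td - st.2.2 > tc - st.2.1 - 1 then st.1 + 1 else st.1), st.2.1 + 1, st.2.2)
  else if a == "god" then ((if td - st.2.2 - 1 > tc - st.2.1 then st.1 + 1 else st.1), st.2.1, st.2.2 + 1)
  else st

def count_growlers_alt (animals : List String) : Int :=
  let tc : Int := ((PySem.List.count animals "cat" + PySem.List.count animals "tac" : Nat) : Int)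
  let td : Int := ((PySem.List.count animals "dog" + PySem.List.count animals "god" : Nat) : Int)
  (animals.foldl (cgStepB tc td) (0, 0, 0)).1

-- ===== PRECONDITION & SPEC =====
def Spec_count_growlers (animals : List String) (out : Int) : Prop := out = count_growlers_alt animals
instance (animals : List String) (out : Int) : Decidable (Spec_count_growlers animals out) := by unfold Spec_count_growlers; infer_instance

-- ===== CLAIM (what is proved, stated in full; the proofs are below) =====
def Claim_equal_count_growlers : Prop := ∀ (animals : List String), Dom_count_growlers animals → Spec_count_growlers animals (count_growlers animals)

-- ===== LEMMAS AND PROOFS =====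

def cgCat (s : String) : Bool := s == "cat" || s == "tac"
def cgDog (s : String) : Bool := s == "dog" || s == "god"

-- cat/dog counts of a list, and the common mathematical value cgG of both programs
def cgCC (xs : List String) : Int := ((xs.filter cgCat).length : Int)
def cgDC (xs : List String) : Int := ((xs.filter cgDog).length : Int)

def cgContrib (pre : List String) (a : String) (suf : List String) : Int :=
  if a == "tac" || a == "god" then (if cgDC suf > cgCC suf then 1 else 0)
  else if a == "cat" || a == "dog" then (if cgDC pre > cgCC pre then 1 else 0)
  else 0

def cgG (pre rest : List String) : Int :=
  match rest with
  | [] => 0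
  | a :: t => cgContrib pre a t + cgG (pre ++ [a]) t

theorem cgCC_cons (a : String) (t : List String) :
    cgCC (a :: t) = (if cgCat a then 1 else 0) + cgCC t := by
  by_cases h : cgCat a <;> simp [cgCC, List.filter_cons, h] <;> omega

theorem cgDC_cons (a : String) (t : List String) :
    cgDC (a :: t) = (if cgDog a then 1 else 0) + cgDC t := by
  by_cases h : cgDog a <;> simp [cgDC, List.filter_cons, h] <;> omega

theorem cgCC_append (l r : List String) : cgCC (l ++ r) = cgCC l + cgCC r := by
  simp [cgCC]

theorem cgDC_append (l r : List String) : cgDC (l ++ r) = cgDC l + cgDC r := by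
  simp [cgDC]

theorem cgCC_singleton (a : String) : cgCC [a] = (if cgCat a then 1 else 0) := by
  rw [show [a] = a :: ([] : List String) from rfl, cgCC_cons]; simp [cgCC]

theorem cgDC_singleton (a : String) : cgDC [a] = (if cgDog a then 1 else 0) := by
  rw [show [a] = a :: ([] : List String) from rfl, cgDC_cons]; simp [cgDC]

-- the inner (cats,dogs) loop of A counts cats and dogs of the traversed list
theorem innerA_counts (l : List String) (c d : Int) :
    l.foldl cgInnerA (c, d) = (c + cgCC l, d + cgDC l) := by
  induction l generalizing c d with
  | nil => simp [cgCC, cgDC]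
  | cons a t ih =>
      simp only [List.foldl_cons, cgInnerA, cgCC_cons, cgDC_cons, cgCat, cgDog]
      by_cases h1 : (a == "cat" || a == "tac") = true <;>
        by_cases h2 : (a == "dog" || a == "god") = true <;>
          simp [h1, h2, ih, Prod.ext_iff] <;> omega

-- A's per-index contribution to res
def cgStepA (xs : List String) (i : Int) : Int :=
  cgContrib (xs.take i.toNat) (PySem.List.pyGetD xs i "") (xs.drop (i.toNat + 1))

-- B's totals (list.count sums) compute cgCC / cgDC
theorem counts_cat (l : List String) :
    ((PySem.List.count l "cat" + PySem.List.count l "tac" : Nat) : Int) = cgCC l := by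
  induction l with
  | nil => simp [PySem.List.count, cgCC]
  | cons a t ih =>
      rw [cgCC_cons, ← ih]
      by_cases e1 : a = "cat"
      · subst e1; simp [PySem.List.count, List.count_cons, cgCat]; push_cast; ring
      · by_cases e2 : a = "tac"
        · subst e2; simp [PySem.List.count, List.count_cons, cgCat]; push_cast; ring
        · simp [PySem.List.count, List.count_cons, e1, e2, cgCat]

theorem counts_dog (l : List String) :
    ((PySem.List.count l "dog" + PySem.List.count l "god" : Nat) : Int) = cgDC l := by
  induction l with
  | nil => simp [PySem.List.count, cgDC]
  | cons a t ih =>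
      rw [cgDC_cons, ← ih]
      by_cases e1 : a = "dog"
      · subst e1; simp [PySem.List.count, List.count_cons, cgDog]; push_cast; ring
      · by_cases e2 : a = "god"
        · subst e2; simp [PySem.List.count, List.count_cons, cgDog]; push_cast; ring
        · simp [PySem.List.count, List.count_cons, e1, e2, cgDog]

-- B's main fold, relative to a prefix already consumed
theorem altB_loop (rest : List String) : ∀ (pre : List String) (res tc td : Int),
    tc = cgCC (pre ++ rest) → td = cgDC (pre ++ rest) →
    (rest.foldl (cgStepB tc td) (res, cgCC pre, cgDC pre)).1 = res + cgG pre rest := by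
  induction rest with
  | nil => intro pre res tc td _ _; simp [cgG]
  | cons a t ih =>
      intro pre res tc td htc htd
      have hpre : pre ++ a :: t = (pre ++ [a]) ++ t := by simp
      have hstep : cgStepB tc td (res, cgCC pre, cgDC pre) a
          = (res + cgContrib pre a t, cgCC (pre ++ [a]), cgDC (pre ++ [a])) := by
        have harith_c : tc - cgCC pre - (if cgCat a then 1 else 0) = cgCC t := by
          rw [htc, cgCC_append, cgCC_cons]; ring
        have harith_d : td - cgDC pre - (if cgDog a then 1 else 0) = cgDC t := by
          rw [htd, cgDC_append, cgDC_cons]; ring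
        by_cases e1 : a = "cat"
        · have hc : tc - cgCC pre - 1 = cgCC t := by simpa [e1, cgCat] using harith_c
          subst e1
          simp [cgStepB, cgContrib, cgCC_append, cgDC_append, cgCC_singleton,
            cgDC_singleton, cgCat, cgDog, Prod.ext_iff]
          split_ifs <;> omega
        · by_cases e2 : a = "dog"
          · have hd : td - cgDC pre - 1 = cgDC t := by simpa [e2, cgDog] using harith_d
            subst e2
            simp [cgStepB, cgContrib, cgCC_append, cgDC_append, cgCC_singleton,
              cgDC_singleton, cgCat, cgDog, Prod.ext_iff]
            split_ifs <;> omega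
          · by_cases e3 : a = "tac"
            · have hc : tc - cgCC pre - 1 = cgCC t := by simpa [e3, cgCat] using harith_c
              have hd : td - cgDC pre = cgDC t := by simpa [e3, cgDog] using harith_d
              subst e3
              simp [cgStepB, cgContrib, cgCC_append, cgDC_append, cgCC_singleton,
                cgDC_singleton, cgCat, cgDog, Prod.ext_iff]
              split_ifs <;> omega
            · by_cases e4 : a = "god"
              · have hc : tc - cgCC pre = cgCC t := by simpa [e4, cgCat] using harith_c
                have hd : td - cgDC pre - 1 = cgDC t := by simpa [e4, cgDog] using harith_d
                subst e4
                simp [cgStepB, cgContrib, cgCC_append, cgDC_append, cgCC_singleton,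
                  cgDC_singleton, cgCat, cgDog, Prod.ext_iff]
                split_ifs <;> omega
              · simp [cgStepB, cgContrib, cgCC_append, cgDC_append, cgCC_singleton,
                  cgDC_singleton, cgCat, cgDog, e1, e2, e3, e4, Prod.ext_iff]
      rw [List.foldl_cons, hstep, ih (pre ++ [a]) (res + cgContrib pre a t) tc td
        (by rw [htc, hpre]) (by rw [htd, hpre]), cgG]
      ring

-- A's per-index body equals cgStepA at a valid index
theorem stepA_eq (xs : List String) (i : Int) (res : Int)
    (h0 : 0 ≤ i) (hlt : i < (xs.length : Int)) :
    cgOuterA xs res i = res + cgStepA xs i := by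
  have hi1 : (0:Int) ≤ i + 1 := by omega
  have hdropIdx : (i + 1).toNat = i.toNat + 1 := by omega
  have hsuf : (PySem.List.pyRange (i + 1) (xs.length : Int) 1).foldl
      (fun cd j => cgInnerA cd (PySem.List.pyGetD xs j "")) ((0:Int), (0:Int))
      = ((0:Int) + cgCC (xs.drop (i.toNat + 1)), (0:Int) + cgDC (xs.drop (i.toNat + 1))) := by
    rw [PySem.List.foldl_pyRange_pyGetD' xs "" cgInnerA ((0:Int),(0:Int)) hi1,
        innerA_counts, hdropIdx]
  have hpreList : (PySem.List.pyRange 0 i 1).foldl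
      (fun cd j => cgInnerA cd (PySem.List.pyGetD xs j "")) ((0:Int), (0:Int))
      = ((0:Int) + cgCC (xs.take i.toNat), (0:Int) + cgDC (xs.take i.toNat)) := by
    have hlen : ((xs.take i.toNat).length : Int) = i := by
      simp [List.length_take]; omega
    have hcongr : (PySem.List.pyRange 0 i 1).foldl
        (fun cd j => cgInnerA cd (PySem.List.pyGetD xs j "")) ((0:Int), (0:Int))
        = (PySem.List.pyRange 0 i 1).foldl
        (fun cd j => cgInnerA cd (PySem.List.pyGetD (xs.take i.toNat) j "")) ((0:Int), (0:Int)) := by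
      refine PySem.List.foldl_congr_mem _ _ _ _ (fun cd j hj => ?_)
      have hj' := (PySem.List.mem_pyRange_one).1 hj
      have hjlt : j.toNat < i.toNat := by omega
      rw [PySem.List.pyGetD_of_nonneg _ _ hj'.1, PySem.List.pyGetD_of_nonneg _ _ hj'.1]
      simp [List.getD, List.getElem?_take, hjlt]
    rw [hcongr]
    have h := PySem.List.foldl_pyRange_zero_pyGetD' (xs.take i.toNat) "" cgInnerA ((0:Int), (0:Int))
    rw [hlen] at h
    rw [h, innerA_counts]
  simp only [cgOuterA, cgStepA, cgContrib, hsuf, hpreList]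
  by_cases h1 : (PySem.List.pyGetD xs i "" == "tac" || PySem.List.pyGetD xs i "" == "god") = true <;>
    by_cases h2 : (PySem.List.pyGetD xs i "" == "cat" || PySem.List.pyGetD xs i "" == "dog") = true
  · exfalso
    rcases Bool.or_eq_true_iff.1 h1 with h | h <;> rcases Bool.or_eq_true_iff.1 h2 with h' | h' <;>
      · have e := of_decide_eq_true h
        have e' := of_decide_eq_true h'
        rw [e] at e'
        simp at e'
  · simp only [h1, h2, Bool.false_eq_true, if_true, if_false, hsuf]
    simp only [Int.zero_add]
    split_ifs <;> omega
  · simp only [h1, h2, Bool.false_eq_true, if_true, if_false]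
    simp only [hpreList, Int.zero_add]
    split_ifs <;> omega
  · simp [h1, h2]

-- the sum of A's per-index contributions over the index range is cgG
theorem sumStep (rest : List String) : ∀ (pre : List String),
    ((PySem.List.pyRange (pre.length : Int) (((pre ++ rest).length : Nat) : Int) 1).map
      (cgStepA (pre ++ rest))).sum = cgG pre rest := by
  induction rest with
  | nil =>
      intro pre
      rw [PySem.List.pyRange_one_eq_nil (by simp)]
      simp [cgG]
  | cons a t ih =>
      intro pre
      have hlt : (pre.length : Int) < (((pre ++ a :: t).length : Nat) : Int) := by
        simp
      rw [PySem.List.pyRange_one_cons hlt]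
      simp only [List.map_cons, List.sum_cons]
      have hhead : cgStepA (pre ++ a :: t) (pre.length : Int) = cgContrib pre a t := by
        unfold cgStepA
        have h1 : ((pre.length : Int)).toNat = pre.length := by omega
        have hget : PySem.List.pyGetD (pre ++ a :: t) ((pre.length : Nat) : Int) "" = a := by
          rw [PySem.List.pyGetD_natCast]
          simp [List.getD, List.getElem?_append_right (Nat.le_refl pre.length)]
        have hdrop : (pre ++ a :: t).drop (pre.length + 1) = t := by
          rw [show pre ++ a :: t = (pre ++ [a]) ++ t by simp,
              show pre.length + 1 = (pre ++ [a]).length by simp]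
          simp
        rw [h1, hget, hdrop]
        simp
      have htail := ih (pre ++ [a])
      rw [show (pre ++ [a]) ++ t = pre ++ a :: t by simp] at htail
      rw [show ((pre ++ [a]).length : Int) = (pre.length : Int) + 1 by simp] at htail
      rw [hhead, htail, cgG]

theorem count_growlers_spec : Claim_equal_count_growlers := by
  unfold Claim_equal_count_growlers Spec_count_growlers
  intro animals _
  have hB : count_growlers_alt animals = cgG [] animals := by
    unfold count_growlers_alt
    rw [counts_cat, counts_dog]
    have h := altB_loop animals [] 0 (cgCC animals) (cgDC animals)
      (by simp) (by simp)
    simpa [cgCC, cgDC] using h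
  rw [hB]
  unfold count_growlers
  by_cases hnil : animals = []
  · subst hnil; simp [cgG]
  · rw [if_neg (by simpa using hnil)]
    have hcongr : (PySem.List.pyRange 0 (animals.length : Int) 1).foldl (cgOuterA animals) 0
        = (PySem.List.pyRange 0 (animals.length : Int) 1).foldl
            (fun res i => res + cgStepA animals i) 0 := by
      refine PySem.List.foldl_congr_mem _ _ _ _ (fun res i hi => ?_)
      have hi' := (PySem.List.mem_pyRange_one).1 hi
      exact stepA_eq animals i res hi'.1 hi'.2
    rw [hcongr, PySem.List.foldl_add]
    have h := sumStep animals []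
    simpa using h
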